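-- pv_equiv track=rewrite | github.com/rwst/bbchallenge | 1RB---0RB0LA2RA_2LB2LA3RA4LB0LB/sim.py | tape_str
-- ===== SOURCE A (Python) =====
-- def tape_str(tape, head, width=40):
--     """Render tape around head position."""
--     lo = head - width
--     hi = head + width
--     chars = []
--     for i in range(lo, hi + 1):
--         s = str(tape[i])
--         if i == head:
--             s = f'[{s}]'
--         chars.append(s)
--     return ''.join(chars)
-- ===== SOURCE B (Python) =====
-- def tape_str(tape, head, width=40):
--     """Render tape around head position."""
--     def ring(k):
--         # window of radius k around head, built by nesting outward cells
--         if k == 0: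
--             return '[' + str(tape[head]) + ']'
--         return str(tape[head - k]) + ring(k - 1) + str(tape[head + k])
--     if width < 0:
--         return ''
--     return ring(width)
-- ===== Notes on version B (the rewrite author's own statement) =====
-- stated objective: alternative
-- what changed: Replaces A's single left-to-right loop over indices with a branch on i==head by a symmetric recursion on the radius: ring(k) wraps ring(k-1) between the two cells at distance k from the head, with the bracketed head cell as the base case; a negative width is the empty window ''.
import Mathlib
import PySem

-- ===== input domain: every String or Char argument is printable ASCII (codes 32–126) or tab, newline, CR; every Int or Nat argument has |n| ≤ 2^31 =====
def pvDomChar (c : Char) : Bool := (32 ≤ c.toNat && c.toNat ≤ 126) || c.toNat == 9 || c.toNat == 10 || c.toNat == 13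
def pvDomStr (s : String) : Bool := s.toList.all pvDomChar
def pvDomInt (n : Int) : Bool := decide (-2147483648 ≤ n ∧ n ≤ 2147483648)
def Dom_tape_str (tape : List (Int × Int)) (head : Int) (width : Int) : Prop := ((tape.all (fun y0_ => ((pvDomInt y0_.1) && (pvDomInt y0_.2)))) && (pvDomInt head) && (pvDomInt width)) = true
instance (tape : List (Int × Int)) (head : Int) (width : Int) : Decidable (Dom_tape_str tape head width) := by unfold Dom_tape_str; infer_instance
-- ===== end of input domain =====

-- B builds the window by symmetric recursion on the radius (ring k wraps ring (k-1) between
-- the two cells at distance k) instead of A's left-to-right loop with a per-cell i==head branch.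


-- shared primitive: Python's tape[i] (dict lookup, first match) rendered with str();
-- the .getD 0 default is never reached on Pre_ (every window key is present)
def pvCell (tape : List (Int × Int)) (i : Int) : String :=
  PySem.Int.toStr (((PySem.Dict.mk tape).get? i).getD 0)

-- ===== PORT A =====
def tape_str (tape : List (Int × Int)) (head : Int) (width : Int) : String :=
  let lo := head - width
  let hi := head + width
  let chars := (PySem.List.pyRange lo (hi + 1) 1).foldl
    (fun acc i =>
      let s := pvCell tape i
      let s := if i == head then "[" ++ s ++ "]" else s
      acc ++ [s]) []
  PySem.Str.join "" chars

-- ===== PORT B =====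
-- ring k = window of radius k around head, nesting outward cells around the bracketed head
def pvRing (tape : List (Int × Int)) (head : Int) : Nat → String
  | 0 => "[" ++ pvCell tape head ++ "]"
  | k + 1 => pvCell tape (head - (k + 1)) ++ pvRing tape head k ++ pvCell tape (head + (k + 1))

def tape_str_alt (tape : List (Int × Int)) (head : Int) (width : Int) : String :=
  if width < 0 then "" else pvRing tape head width.toNat

-- ===== PRECONDITION & SPEC =====
-- Pre_ excludes only windows containing a key absent from the tape, where Python A raises KeyError.
def Pre_tape_str (tape : List (Int × Int)) (head : Int) (width : Int) : Prop :=
  0 ≤ width →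
  ((((PySem.Dict.mk tape).keys.filter
      (fun i => decide (head - width ≤ i) && decide (i ≤ head + width))).length : Int) = 2 * width + 1)
instance (tape : List (Int × Int)) (head : Int) (width : Int) : Decidable (Pre_tape_str tape head width) := by unfold Pre_tape_str; infer_instance

def pvWitness_tape_str : (List (Int × Int)) × Int × Int := ([(-1, 7), (0, 3), (1, 4)], 0, 1)

def Spec_tape_str (tape : List (Int × Int)) (head : Int) (width : Int) (out : String) : Prop := out = tape_str_alt tape head width
instance (tape : List (Int × Int)) (head : Int) (width : Int) (out : String) : Decidable (Spec_tape_str tape head width out) := by unfold Spec_tape_str; infer_instance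

-- ===== CLAIM (what is proved, stated in full; the proofs are below) =====
def Claim_equal_tape_str : Prop := ∀ (tape : List (Int × Int)) (head : Int) (width : Int), Dom_tape_str tape head width → Pre_tape_str tape head width → Spec_tape_str tape head width (tape_str tape head width)

-- ===== LEMMAS AND PROOFS =====

-- A's append-accumulating foldl builds exactly the mapped list
theorem pv_foldl_append_map {α β : Type} (f : α → β) (l : List α) (init : List β) :
    l.foldl (fun acc i => acc ++ [f i]) init = init ++ l.map f := by
  induction l generalizing init with
  | nil => simp
  | cons x xs ih => simp [List.foldl_cons, ih]

-- joining with the empty separator is flattening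
theorem pv_join_nil_flatten (xss : List (List Char)) :
    PySem.Chars.join [] xss = xss.flatten := by
  induction xss with
  | nil => simp [PySem.Chars.join_nil]
  | cons p rest ih =>
    cases rest with
    | nil => simp [PySem.Chars.join, List.intercalate]
    | cons q r => simp [PySem.Chars.join_cons_cons, ih]

-- the recursive ring equals the concatenation of the left window, bracketed head, right window
theorem pv_ring_eq (tape : List (Int × Int)) (head : Int) (k : Nat) :
    (pvRing tape head k).toList =
      ((PySem.List.pyRange (head - k) head 1).map (fun i => (pvCell tape i).toList)).flatten
      ++ ('[' :: (pvCell tape head).toList ++ [']'])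
      ++ ((PySem.List.pyRange (head + 1) (head + k + 1) 1).map (fun i => (pvCell tape i).toList)).flatten := by
  induction k with
  | zero =>
    simp [pvRing, PySem.List.pyRange_one_eq_nil (le_refl head),
      PySem.List.pyRange_one_eq_nil (le_refl (head + 1))]
  | succ k ih =>
    have hleft : PySem.List.pyRange (head - (k + 1 : Nat)) head 1
        = (head - (k + 1 : Nat)) :: PySem.List.pyRange (head - k) head 1 := by
      rw [PySem.List.pyRange_one_cons (by push_cast; omega)]
      congr 2
      push_cast; omega
    have hright : PySem.List.pyRange (head + 1) (head + (k + 1 : Nat) + 1) 1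
        = PySem.List.pyRange (head + 1) (head + k + 1) 1 ++ [head + k + 1] := by
      have : head + ((k : Int) + 1) + 1 = (head + k + 1) + 1 := by ring
      push_cast
      rw [this, PySem.List.pyRange_one_succ_right (by omega)]
    rw [hleft, hright] at *
    simp only [pvRing, String.toList_append, ih, List.map_cons, List.map_append,
      List.flatten_cons, List.flatten_append]
    have h2 : head + ((k:Int) + 1) = head + (k:Int) + 1 := by ring
    push_cast
    simp [List.append_assoc, h2]

theorem tape_str_spec : Claim_equal_tape_str := by
  intro tape head width _hdom _hpre
  unfold Spec_tape_str tape_str tape_str_alt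
  simp only []
  rcases lt_or_ge width 0 with hw | hw
  · rw [if_pos (by omega : width < 0),
      PySem.List.pyRange_one_eq_nil (by omega : head + width + 1 ≤ head - width)]
    apply String.toList_inj.mp
    simp [PySem.Str.toList_join, PySem.Chars.join_nil]
  rw [if_neg (by omega : ¬ width < 0)]
  rw [pv_foldl_append_map]
  apply String.toList_inj.mp
  rw [pv_ring_eq]
  have hsplit1 : PySem.List.pyRange (head - width) (head + width + 1) 1
      = PySem.List.pyRange (head - width) head 1 ++ PySem.List.pyRange head (head + width + 1) 1 :=
    PySem.List.pyRange_one_append _ _ _ (by omega) (by omega)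
  have hsplit2 : PySem.List.pyRange head (head + width + 1) 1
      = head :: PySem.List.pyRange (head + 1) (head + width + 1) 1 :=
    PySem.List.pyRange_one_cons (by omega)
  rw [hsplit1, hsplit2]
  have hleft : (PySem.List.pyRange (head - width) head 1).map
      (fun i => if i == head then "[" ++ pvCell tape i ++ "]" else pvCell tape i)
      = (PySem.List.pyRange (head - width) head 1).map (pvCell tape) := by
    apply List.map_congr_left
    intro i hi
    have : i < head := (PySem.List.mem_pyRange_one.mp hi).2
    simp [show (i == head) = false by simp; omega]
  have hright : (PySem.List.pyRange (head + 1) (head + width + 1) 1).map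
      (fun i => if i == head then "[" ++ pvCell tape i ++ "]" else pvCell tape i)
      = (PySem.List.pyRange (head + 1) (head + width + 1) 1).map (pvCell tape) := by
    apply List.map_congr_left
    intro i hi
    have : head + 1 ≤ i := (PySem.List.mem_pyRange_one.mp hi).1
    simp [show (i == head) = false by simp; omega]
  have hcast : (width.toNat : Int) = width := Int.toNat_of_nonneg hw
  simp only [List.map_append, List.map_cons, hleft, hright, List.nil_append]
  simp only [PySem.Str.toList_join, List.map_append, List.map_cons]
  simp [pv_join_nil_flatten, List.flatten_append, List.flatten_cons, String.toList_append,
    hcast, List.append_assoc, List.map_map, Function.comp_def]
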